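-- pv_equiv track=rewrite | github.com/sbashett/ctci | q4.9.py | getPermHelperExtend
-- ===== SOURCE A (Python) =====
-- def getPermHelperExtend(prepend_val, listOfArrays, contraintVal=None):
-- 	if contraintVal is None:
-- 		contraintVal = prepend_val
--
-- 	retArrays = [[]]
-- 	for arr in listOfArrays:
-- 		for it in range(len(arr)):
-- 			if it==0:
-- 				retArrays += [[prepend_val] + arr]
-- 			else:
-- 				retArrays += [arr[:it] + [prepend_val] + arr[it:]]
--
-- 			if arr[it] == contraintVal:
-- 				break
--
-- 			if it == len(arr)-1:
-- 				retArrays += [arr + [prepend_val]]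
--
-- 	return retArrays[1:]
-- ===== SOURCE B (Python) =====
-- def getPermHelperExtend(prepend_val, listOfArrays, contraintVal=None):
--     c = prepend_val if contraintVal is None else contraintVal
--     res = []
--     for arr in listOfArrays:
--         if not arr:
--             continue
--         # build the rows back-to-front (a right fold): for each suffix a+suffix,
--         # its rows are [p, a] + suffix followed -- unless a is the constraint --
--         # by a consed onto every row of the shorter suffix.  No indexing, no slicing.
--         suffix = []
--         rows = [[prepend_val]]
--         for a in reversed(arr):
--             if a == c:
--                 rows = [[prepend_val, a] + suffix]
--             else:
--                 rows = [[prepend_val, a] + suffix] + [[a] + r for r in rows]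
--             suffix = [a] + suffix
--         res += rows
--     return res
-- ===== Notes on version B (the rewrite author's own statement) =====
-- stated objective: alternative
-- what changed: B builds each array's insertion rows back-to-front with an iterative right fold: walking reversed(arr) it conses the new head onto every row produced for the shorter suffix (cutting to a single row at the constraint), instead of A's forward index loop over range(len(arr)) with slice splicing, a break, and special first/last-iteration cases.
import Mathlib
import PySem

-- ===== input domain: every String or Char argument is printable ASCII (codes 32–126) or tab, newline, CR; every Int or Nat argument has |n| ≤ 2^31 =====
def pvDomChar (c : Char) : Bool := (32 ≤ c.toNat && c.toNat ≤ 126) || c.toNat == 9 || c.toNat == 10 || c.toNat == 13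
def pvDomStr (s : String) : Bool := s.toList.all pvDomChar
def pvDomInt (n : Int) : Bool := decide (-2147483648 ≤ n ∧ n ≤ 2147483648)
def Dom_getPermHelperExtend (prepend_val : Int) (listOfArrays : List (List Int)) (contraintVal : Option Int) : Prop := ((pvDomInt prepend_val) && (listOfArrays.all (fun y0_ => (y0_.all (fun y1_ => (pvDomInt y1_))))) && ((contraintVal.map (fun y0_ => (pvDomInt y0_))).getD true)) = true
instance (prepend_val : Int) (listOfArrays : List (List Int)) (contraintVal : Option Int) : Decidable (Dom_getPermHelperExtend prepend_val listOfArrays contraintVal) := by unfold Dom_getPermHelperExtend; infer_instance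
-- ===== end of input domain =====

-- B builds each array's rows back-to-front (an iterative right fold): for each suffix it
-- conses the new head onto every row of the shorter suffix, cutting at the constraint --
-- no indexing, no slicing, no break.  Objective: alternative.  A = B everywhere.

-- ===== PORT A =====
-- inner 'for it in range(len(arr))' loop of A, with its break and end-append
def pvALoop (p c : Int) (arr : List Int) (it : Nat) (acc : List (List Int)) : List (List Int) :=
  if _h : it < arr.length then
    let acc := if it = 0 then acc ++ [[p] ++ arr]
               else acc ++ [arr.take it ++ [p] ++ arr.drop it]
    if arr.getD it 0 = c then acc            -- arr[it]; it is in range here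
    else
      let acc := if it = arr.length - 1 then acc ++ [arr ++ [p]] else acc
      pvALoop p c arr (it + 1) acc
  else acc
termination_by arr.length - it

def getPermHelperExtend (prepend_val : Int) (listOfArrays : List (List Int)) (contraintVal : Option Int) : List (List Int) :=
  let c := contraintVal.getD prepend_val        -- 'if contraintVal is None: contraintVal = prepend_val'
  let retArrays := listOfArrays.foldl (fun acc arr => pvALoop prepend_val c arr 0 acc) [[]]
  retArrays.drop 1                              -- retArrays[1:]

-- ===== PORT B =====
-- one step of Source B's inner loop over reversed(arr): state = (suffix, rows)
def pvStep (p c : Int) (st : List Int × List (List Int)) (a : Int) : List Int × List (List Int) :=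
  (a :: st.1,
   if a = c then [p :: a :: st.1]
   else (p :: a :: st.1) :: st.2.map (fun r => a :: r))

def getPermHelperExtend_alt (prepend_val : Int) (listOfArrays : List (List Int)) (contraintVal : Option Int) : List (List Int) :=
  let c := if contraintVal.isNone then prepend_val else contraintVal.getD prepend_val
  listOfArrays.foldl (fun res arr =>
    if arr = [] then res
    else res ++ (arr.reverse.foldl (pvStep prepend_val c) ([], [[prepend_val]])).2) []

-- ===== PRECONDITION & SPEC =====
def Spec_getPermHelperExtend (prepend_val : Int) (listOfArrays : List (List Int)) (contraintVal : Option Int) (out : List (List Int)) : Prop := out = getPermHelperExtend_alt prepend_val listOfArrays contraintVal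
instance (prepend_val : Int) (listOfArrays : List (List Int)) (contraintVal : Option Int) (out : List (List Int)) : Decidable (Spec_getPermHelperExtend prepend_val listOfArrays contraintVal out) := by unfold Spec_getPermHelperExtend; infer_instance

-- ===== CLAIM (what is proved, stated in full; the proofs are below) =====
def Claim_equal_getPermHelperExtend : Prop := ∀ (prepend_val : Int) (listOfArrays : List (List Int)) (contraintVal : Option Int), Dom_getPermHelperExtend prepend_val listOfArrays contraintVal → Spec_getPermHelperExtend prepend_val listOfArrays contraintVal (getPermHelperExtend prepend_val listOfArrays contraintVal)

-- ===== LEMMAS AND PROOFS =====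

-- the per-array result of B's right fold, as a structural recursion
def pvIns (p c : Int) : List Int → List (List Int)
  | [] => [[p]]
  | a :: t => if a = c then [p :: a :: t]
              else (p :: a :: t) :: (pvIns p c t).map (fun r => a :: r)

lemma pvStep_foldr (p c : Int) (arr : List Int) :
    arr.foldr (fun a st => pvStep p c st a) ([], [[p]]) = (arr, pvIns p c arr) := by
  induction arr with
  | nil => rfl
  | cons a t ih => rw [List.foldr_cons, ih, pvStep, pvIns]

lemma pvStep_loop (p c : Int) (arr : List Int) :
    (arr.reverse.foldl (pvStep p c) ([], [[p]])).2 = pvIns p c arr := by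
  rw [List.foldl_reverse, pvStep_foldr]

-- the cutoff index: first index of c in arr, or arr.length
def pvM (c : Int) (arr : List Int) : Nat :=
  if c ∈ arr then (PySem.List.index? arr c).getD 0 else arr.length

lemma pvM_le (c : Int) (arr : List Int) : pvM c arr ≤ arr.length := by
  unfold pvM
  split_ifs with h
  · rcases (PySem.List.index?_isSome_iff (xs := arr) (v := c)).2 h |> Option.isSome_iff_exists.1 with ⟨k, hk⟩
    rcases PySem.List.getElem_of_index?_eq_some hk with ⟨hlt, _, _⟩
    rw [PySem.List.index?_eq_idxOf?] at hk
    simp [hk]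
    omega
  · exact le_rfl

lemma pvM_spec (c : Int) (arr : List Int) :
    (∀ j (hj : j < pvM c arr), arr[j]'(lt_of_lt_of_le hj (pvM_le c arr)) ≠ c) ∧
    (∀ h : pvM c arr < arr.length, arr[pvM c arr]'h = c) := by
  by_cases h : c ∈ arr
  · rcases (PySem.List.index?_isSome_iff (xs := arr) (v := c)).2 h |> Option.isSome_iff_exists.1 with ⟨k, hk⟩
    have hmk : pvM c arr = k := by
      unfold pvM
      rw [PySem.List.index?_eq_idxOf?] at hk
      simp [h, hk]
    rcases PySem.List.getElem_of_index?_eq_some hk with ⟨hlt, heq, hne⟩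
    refine ⟨fun j hj => ?_, fun _ => ?_⟩
    · have : j < k := hmk ▸ hj
      exact hne j this
    · simp only [hmk]; exact heq
  · have hmk : pvM c arr = arr.length := by unfold pvM; simp [h]
    refine ⟨fun j hj hc => h ?_, fun hlt => absurd hlt (by omega)⟩
    exact hc ▸ List.getElem_mem _

lemma pvM_cons_self (c : Int) (t : List Int) : pvM c (c :: t) = 0 := by
  unfold pvM
  rw [if_pos (List.mem_cons_self)]
  rw [PySem.List.index?_cons_self]
  rfl

lemma pvM_cons_of_ne (a c : Int) (t : List Int) (h : a ≠ c) :
    pvM c (a :: t) = pvM c t + 1 := by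
  unfold pvM
  by_cases hm : c ∈ t
  · rcases (PySem.List.index?_isSome_iff (xs := t) (v := c)).2 hm |> Option.isSome_iff_exists.1 with ⟨k, hk⟩
    rw [if_pos (List.mem_cons.2 (Or.inr hm)), if_pos hm,
        PySem.List.index?_cons_of_ne (x := a) (v := c) (xs := t) h, hk]
    rfl
  · have hnm : c ∉ a :: t := by simp [List.mem_cons, Ne.symm h, hm]
    rw [if_neg hnm, if_neg hm]
    simp

-- B's recursion computes exactly the insertions at positions 0..pvM
lemma pvIns_eq (p c : Int) (arr : List Int) :
    pvIns p c arr =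
      (List.range (pvM c arr + 1)).map (fun i => arr.take i ++ [p] ++ arr.drop i) := by
  induction arr with
  | nil =>
      have : pvM c ([] : List Int) = 0 := by unfold pvM; simp
      simp [pvIns, this]
  | cons a t ih =>
      by_cases h : a = c
      · subst h
        simp [pvIns, pvM_cons_self]
      · rw [pvIns, if_neg h, pvM_cons_of_ne a c t h, ih, List.map_map]
        conv_rhs => rw [List.range_succ_eq_map, List.map_cons, List.map_map]
        refine List.cons_eq_cons.2 ⟨by simp, ?_⟩
        apply List.map_congr_left
        intro i _
        simp [Function.comp]

-- B's per-array contribution (in A's range-map form)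
def pvGen (p c : Int) (arr : List Int) : List (List Int) :=
  if arr = [] then []
  else (List.range (pvM c arr + 1)).map (fun i => arr.take i ++ [p] ++ arr.drop i)

lemma getD_eq_getElem (arr : List Int) (i : Nat) (h : i < arr.length) :
    arr.getD i 0 = arr[i] := by
  simp [List.getD, List.getElem?_eq_getElem h]

-- main loop invariant: from index it (with no constraint seen so far), A's inner loop
-- appends exactly the insertions at positions it..pvM
lemma pvALoop_eq (p c : Int) (arr : List Int) (it : Nat) (acc : List (List Int))
    (hlt : it < arr.length) (hpre : ∀ j (hj : j < it), arr[j] ≠ c) :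
    pvALoop p c arr it acc =
      acc ++ (List.range' it (pvM c arr + 1 - it)).map
        (fun i => arr.take i ++ [p] ++ arr.drop i) := by
  have hm := pvM_spec c arr
  have hitm : it ≤ pvM c arr := by
    by_contra hgt
    have hgt' : pvM c arr < it := by omega
    have hmlt : pvM c arr < arr.length := by omega
    exact hpre (pvM c arr) hgt' (hm.2 hmlt)
  rw [pvALoop]
  simp only [hlt, dif_pos]
  have hins : (if it = 0 then acc ++ [[p] ++ arr]
               else acc ++ [arr.take it ++ [p] ++ arr.drop it]) =
      acc ++ [arr.take it ++ [p] ++ arr.drop it] := by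
    split_ifs with h0
    · subst h0; simp
    · rfl
  rw [hins, getD_eq_getElem arr it hlt]
  by_cases hc : arr[it] = c
  · -- break: pvM = it
    have hmeq : pvM c arr = it := by
      have h1 : ¬ it < pvM c arr := fun h => hm.1 it h hc
      omega
    simp [hc, hmeq, List.range'_one]
  · have hmgt : it < pvM c arr := by
      rcases lt_or_eq_of_le hitm with h | h
      · exact h
      · exact absurd (hm.2 (h ▸ hlt)) (h ▸ hc)
    simp only [if_neg hc]
    by_cases hlast : it = arr.length - 1
    · -- last index, no constraint anywhere: pvM = length
      have hmlen : pvM c arr = arr.length := by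
        have := pvM_le c arr; omega
      have hstop : ¬ it + 1 < arr.length := by omega
      rw [if_pos hlast, pvALoop, dif_neg hstop]
      have hr : pvM c arr + 1 - it = 2 := by omega
      have hit1 : it + 1 = arr.length := by omega
      rw [hr]
      simp [List.range', hit1, List.take_length, List.drop_length]
    · have hlt' : it + 1 < arr.length := by omega
      rw [if_neg hlast]
      have hpre' : ∀ j (hj : j < it + 1), arr[j] ≠ c := by
        intro j hj
        rcases Nat.lt_succ_iff_lt_or_eq.1 hj with h | h
        · exact hpre j h
        · subst h; exact hc
      rw [pvALoop_eq p c arr (it + 1) _ hlt' hpre']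
      have hsplit : List.range' it (pvM c arr + 1 - it) =
          it :: List.range' (it + 1) (pvM c arr + 1 - (it + 1)) := by
        have : pvM c arr + 1 - it = (pvM c arr + 1 - (it + 1)) + 1 := by omega
        rw [this, List.range'_succ]
      rw [hsplit]
      simp
termination_by arr.length - it

lemma pvALoop_zero (p c : Int) (arr : List Int) (acc : List (List Int)) :
    pvALoop p c arr 0 acc = acc ++ pvGen p c arr := by
  by_cases h : arr = []
  · subst h
    rw [pvALoop]
    simp [pvGen]
  · have hlt : 0 < arr.length := List.length_pos_iff.2 h
    rw [pvALoop_eq p c arr 0 acc hlt (fun j hj => absurd hj (Nat.not_lt_zero j))]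
    unfold pvGen
    simp [if_neg h, List.range_eq_range']

lemma foldl_aloop (p c : Int) (ls : List (List Int)) (acc : List (List Int)) :
    ls.foldl (fun acc arr => pvALoop p c arr 0 acc) acc = acc ++ ls.flatMap (pvGen p c) := by
  induction ls generalizing acc with
  | nil => simp
  | cons a t ih =>
      rw [List.foldl_cons, pvALoop_zero, ih]
      simp

lemma alt_fold (p c : Int) (ls : List (List Int)) :
    ls.foldl (fun res arr => if arr = [] then res
      else res ++ (arr.reverse.foldl (pvStep p c) ([], [[p]])).2) [] =
    ls.flatMap (pvGen p c) := by
  have h1 : ls.foldl (fun res arr => if arr = [] then res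
      else res ++ (arr.reverse.foldl (pvStep p c) ([], [[p]])).2) [] =
      ls.foldl (fun res arr => res ++ pvGen p c arr) [] := by
    apply PySem.List.foldl_congr_mem
    intro res arr _
    unfold pvGen
    rw [pvStep_loop, pvIns_eq]
    split_ifs with h <;> simp
  rw [h1, PySem.List.foldl_append_eq_flatMap]
  simp

-- ===== VERDICT (by name: the statement is the Claim_ definition above) =====
theorem getPermHelperExtend_spec : Claim_equal_getPermHelperExtend := by
  intro p ls cv _
  unfold Spec_getPermHelperExtend
  have hc : (if cv.isNone then p else cv.getD p) = cv.getD p := by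
    cases cv <;> simp
  show (List.foldl (fun acc arr => pvALoop p (cv.getD p) arr 0 acc) [[]] ls).drop 1 =
    ls.foldl (fun res arr => if arr = [] then res
      else res ++ (arr.reverse.foldl (pvStep p (if cv.isNone then p else cv.getD p)) ([], [[p]])).2) []
  rw [hc, alt_fold, foldl_aloop]
  simp
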